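-- pv_equiv track=rewrite | github.com/Stavfe/Bulls-and-Cows-Solver | Bulls_and_Cows_solver.py | num_is_legit
-- ===== SOURCE A (Python) =====
-- NUM_OF_DIGITS = 4
--
-- def num_is_legit(num):
--     """
--     check if number is safe to use: no zeros, or duplicates, and in right size
--     :param num: str number
--     :return: true if allowed number
--     """
--     if len(num) != NUM_OF_DIGITS:
--         return False
--     for i in range(len(num)):
--         if num[i] == '0':
--             return False
--         for j in range(i + 1, len(num)):
--             if num[i] == num[j]:
--                 return False
--
--     return True
-- ===== SOURCE B (Python) =====
-- NUM_OF_DIGITS = 4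
--
-- def num_is_legit(num):
--     """
--     check if number is safe to use: no zeros, or duplicates, and in right size
--     :param num: str number
--     :return: true if allowed number
--     """
--     return len(num) == NUM_OF_DIGITS and '0' not in num and len(set(num)) == len(num)
-- ===== Notes on version B (the rewrite author's own statement) =====
-- stated objective: simpler
-- what changed: The O(n^2) nested pairwise index scan (plus per-index zero test) is replaced by a single expression: length guard, one membership test for the zero digit, and a set built in one pass whose size equals the length iff there are no duplicates.
import Mathlib
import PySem

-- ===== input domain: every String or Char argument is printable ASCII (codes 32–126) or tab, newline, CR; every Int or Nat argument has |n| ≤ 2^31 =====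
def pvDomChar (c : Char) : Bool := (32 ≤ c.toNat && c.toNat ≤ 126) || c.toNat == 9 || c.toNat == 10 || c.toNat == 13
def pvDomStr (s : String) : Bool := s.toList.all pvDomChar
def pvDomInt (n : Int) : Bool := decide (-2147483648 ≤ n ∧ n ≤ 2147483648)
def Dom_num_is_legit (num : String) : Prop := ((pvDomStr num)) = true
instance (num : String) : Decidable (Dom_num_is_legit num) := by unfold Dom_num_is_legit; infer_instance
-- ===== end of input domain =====

-- B replaces A's nested pairwise duplicate scan with a length guard, one '0'-membership test
-- and a one-pass set whose size equals the length iff there are no duplicates (simpler, one pass).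


-- ===== PORT A =====
-- inner loop: 'for j in range(i + 1, len(num)): if num[i] == num[j]: return False'
-- (returns true iff the early 'return False' fires)
def aInner (cs : List Char) (c : Char) (j : Nat) : Bool :=
  if h : j < cs.length then
    if cs[j] == c then true else aInner cs c (j + 1)
  else false
termination_by cs.length - j

-- outer loop: 'for i in range(len(num)): …'
def aOuter (cs : List Char) (i : Nat) : Bool :=
  if h : i < cs.length then
    if cs[i] == '0' then false
    else if aInner cs cs[i] (i + 1) then false
    else aOuter cs (i + 1)
  else true
termination_by cs.length - i

def num_is_legit (num : String) : Bool :=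
  if num.toList.length ≠ 4 then false
  else aOuter num.toList 0

-- ===== PORT B =====
def num_is_legit_alt (num : String) : Bool :=
  num.toList.length == 4
    && !(PySem.Str.isIn "0" num)
    && (PySem.Set.ofList num.toList).length == num.toList.length

-- ===== PRECONDITION & SPEC =====
def Spec_num_is_legit (num : String) (out : Bool) : Prop := out = num_is_legit_alt num
instance (num : String) (out : Bool) : Decidable (Spec_num_is_legit num out) := by unfold Spec_num_is_legit; infer_instance

-- ===== CLAIM (what is proved, stated in full; the proofs are below) =====
def Claim_equal_num_is_legit : Prop := ∀ (num : String), Dom_num_is_legit num → Spec_num_is_legit num (num_is_legit num)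

-- ===== LEMMAS AND PROOFS =====

lemma aInner_eq (cs : List Char) (c : Char) (j : Nat) :
    aInner cs c j = (cs.drop j).contains c := by
  fun_induction aInner cs c j with
  | case1 j h hc =>
      simp only [beq_iff_eq] at hc
      rw [List.drop_eq_getElem_cons h, List.contains_cons]
      simp [hc]
  | case2 j h hc ih =>
      simp only [beq_iff_eq] at hc
      rw [List.drop_eq_getElem_cons h, List.contains_cons, ih]
      simp [beq_iff_eq, Ne.symm hc]
  | case3 j h =>
      rw [List.drop_eq_nil_iff.mpr (by omega)]
      simp

lemma aOuter_eq (cs : List Char) (i : Nat) :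
    aOuter cs i = (!(cs.drop i).contains '0' && decide (cs.drop i).Nodup) := by
  fun_induction aOuter cs i with
  | case1 i h hc =>
      simp only [beq_iff_eq] at hc
      rw [List.drop_eq_getElem_cons h, List.contains_cons]
      simp [hc]
  | case2 i h hc hd =>
      rw [aInner_eq] at hd
      have hnd : ¬ (List.drop i cs).Nodup := by
        rw [List.drop_eq_getElem_cons h]
        exact fun hn => (List.nodup_cons.mp hn).1 (by simpa [List.contains_eq_mem] using hd)
      simp [hnd]
  | case3 i h hc hd ih =>
      simp only [beq_iff_eq] at hc
      rw [aInner_eq] at hd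
      rw [ih, Bool.eq_iff_iff, List.drop_eq_getElem_cons h]
      simp only [List.contains_eq_mem, List.nodup_cons, List.mem_cons, Bool.and_eq_true,
        Bool.not_eq_eq_eq_not, Bool.not_true, decide_eq_false_iff_not, decide_eq_true_eq] at hd ⊢
      constructor
      · rintro ⟨h0, hn⟩
        refine ⟨?_, hd, hn⟩
        rintro (he | hm)
        · exact hc he.symm
        · exact h0 hm
      · rintro ⟨h0, -, hn⟩
        exact ⟨fun hm => h0 (Or.inr hm), hn⟩
  | case4 i h =>
      rw [List.drop_eq_nil_iff.mpr (by omega)]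
      simp

lemma add_of_mem (s : PySem.Set Char) (c : Char) (h : c ∈ s) :
    PySem.Set.add s c = s := by
  simp only [PySem.Set.add, PySem.Set.contains]
  rw [if_pos (by simpa [List.contains_eq_mem] using h)]

lemma add_of_not_mem (s : PySem.Set Char) (c : Char) (h : c ∉ s) :
    PySem.Set.add s c = s ++ [c] := by
  simp only [PySem.Set.add, PySem.Set.contains]
  rw [if_neg (by simpa [List.contains_eq_mem] using h)]

lemma len_foldl_add_le (cs : List Char) (s : PySem.Set Char) :
    (cs.foldl PySem.Set.add s).length ≤ s.length + cs.length := by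
  induction cs generalizing s with
  | nil => simp
  | cons d ds ih =>
      simp only [List.foldl_cons]
      have h1 : (PySem.Set.add s d).length ≤ s.length + 1 := by
        by_cases hd : d ∈ s
        · rw [add_of_mem s d hd]; omega
        · rw [add_of_not_mem s d hd]; simp
      calc (ds.foldl PySem.Set.add (PySem.Set.add s d)).length
          ≤ (PySem.Set.add s d).length + ds.length := ih _
        _ ≤ s.length + (d :: ds).length := by simp; omega

-- size of the set built by foldl add: equals |s| + |cs| iff cs has no duplicates and is disjoint from s
lemma foldl_add_length_eq_iff (cs : List Char) (s : PySem.Set Char) :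
    ((cs.foldl PySem.Set.add s).length = s.length + cs.length) ↔
      (cs.Nodup ∧ ∀ x ∈ cs, x ∉ s) := by
  induction cs generalizing s with
  | nil => simp
  | cons c cs ih =>
      simp only [List.foldl_cons, List.nodup_cons]
      by_cases hc : c ∈ s
      · rw [add_of_mem s c hc]
        constructor
        · intro hlen
          have hle := len_foldl_add_le cs s
          simp at hlen; omega
        · rintro ⟨-, hdisj⟩
          exact absurd hc (hdisj c (by simp))
      · rw [add_of_not_mem s c hc]
        rw [show s.length + (c :: cs).length = (s ++ [c]).length + cs.length by simp; omega]
        rw [ih]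
        constructor
        · rintro ⟨hnd, hdisj⟩
          have hcn : c ∉ cs := fun hm => by simpa [hc] using hdisj c hm
          refine ⟨⟨hcn, hnd⟩, fun x hx => ?_⟩
          rcases List.mem_cons.mp hx with rfl | hx'
          · exact hc
          · intro hxs; exact (hdisj x hx') (List.mem_append.mpr (Or.inl hxs))
        · rintro ⟨⟨hcn, hnd⟩, hdisj⟩
          refine ⟨hnd, fun x hx => ?_⟩
          simp only [List.mem_append, List.mem_singleton]
          rintro (hxs | rfl)
          · exact hdisj x (List.mem_cons_of_mem c hx) hxs
          · exact hcn hx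

lemma ofList_length_eq_iff (cs : List Char) :
    ((PySem.Set.ofList cs).length = cs.length) ↔ cs.Nodup := by
  have := foldl_add_length_eq_iff cs []
  simpa [PySem.Set.ofList_eq_foldl] using this

lemma isIn_zero (num : String) :
    PySem.Str.isIn "0" num = num.toList.contains '0' := by
  rw [Bool.eq_iff_iff, PySem.Str.isIn_iff_infix]
  rw [show ("0" : String).toList = ['0'] from rfl]
  rw [List.singleton_infix_iff]
  simp [List.contains_eq_mem]

-- ===== VERDICT (by name: the statement is the Claim_ definition above) =====
theorem num_is_legit_spec : Claim_equal_num_is_legit := by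
  intro num _
  unfold Spec_num_is_legit num_is_legit num_is_legit_alt
  rw [isIn_zero]
  generalize num.toList = cs
  by_cases hlen : cs.length = 4
  · rw [if_neg (by omega), aOuter_eq, List.drop_zero]
    rw [show (cs.length == 4) = true by simp [hlen], Bool.true_and]
    congr 1
    rw [Bool.eq_iff_iff]
    simp [ofList_length_eq_iff]

  · rw [if_pos hlen]
    rw [show (cs.length == 4) = false by simp [hlen]]
    simp
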